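-- pv_equiv track=rewrite | github.com/ComplexData-MILA/MitigateMisinfo | LIAR-New/remove_politifact_article_verdict.py | remove_labels
-- ===== SOURCE A (Python) =====
-- def remove_labels(article):
--     pf_label_keywords = ['true', 'false', 'pants']
--     tmp_split = article.split('.')
--     tmp_article_without_label = ''
--     for i in range(len(tmp_split)):
--         for keyword in pf_label_keywords:
--             if keyword in tmp_split[-i - 1].lower():
--                 tmp_article_without_label = '.'.join(tmp_split[:-i - 1])
--                 tmp_article_without_label += '.'
--                 return tmp_article_without_label
-- ===== SOURCE B (Python) =====
-- def remove_labels(article):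
--     keywords = ('true', 'false', 'pants')
--     sentences = article.split('.')
--     last_idx = None
--     for idx, sentence in enumerate(sentences):
--         low = sentence.lower()
--         if any(k in low for k in keywords):
--             last_idx = idx
--     if last_idx is None:
--         return None
--     return '.'.join(sentences[:last_idx]) + '.'
-- ===== Notes on version B (the rewrite author's own statement) =====
-- stated objective: alternative
-- what changed: A scans sentences from the end with negative indexing and returns at the first keyword hit; B makes a single forward pass with enumerate, remembering the last keyword-bearing index, and builds the result afterwards.
import Mathlib
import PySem

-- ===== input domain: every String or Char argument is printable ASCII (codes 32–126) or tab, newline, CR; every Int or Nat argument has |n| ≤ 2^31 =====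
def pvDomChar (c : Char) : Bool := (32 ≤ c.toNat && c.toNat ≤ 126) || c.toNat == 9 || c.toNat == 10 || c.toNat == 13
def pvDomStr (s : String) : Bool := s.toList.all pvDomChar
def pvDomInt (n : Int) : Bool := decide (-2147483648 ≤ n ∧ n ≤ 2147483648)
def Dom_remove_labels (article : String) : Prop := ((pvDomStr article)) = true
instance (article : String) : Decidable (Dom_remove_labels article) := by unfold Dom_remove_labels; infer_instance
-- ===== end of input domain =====

-- B replaces A's reverse early-return scan by a single forward pass that remembers the last
-- keyword-bearing sentence index (objective: alternative decomposition, same cost).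


-- ===== PORT A =====
-- for i in range(len(tmp_split)): for keyword in …: if keyword in tmp_split[-i-1].lower(): return '.'.join(tmp_split[:-i-1]) + '.'
-- (the inner keyword loop with early return is ported as List.any: the returned value does not depend on which keyword hit;
--  '+= "."' is ported exactly as appending the char '.' on the List Char side)
def remove_labels_goA (tmp : List String) : List Nat → Option String
  | [] => none
  | i :: rest =>
    if ["true", "false", "pants"].any
        (fun kw => PySem.Str.isIn kw (PySem.Str.lower (PySem.List.pyGetD tmp (-(i : Int) - 1) ""))) then
      some (String.ofList
        ((PySem.Str.join "." (PySem.List.slice tmp none (some (-(i : Int) - 1)))).toList ++ ['.']))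
    else
      remove_labels_goA tmp rest

def remove_labels (article : String) : Option String :=
  let tmp := (PySem.Str.split? article ".").getD []   -- sep "." ≠ "": split? is always `some` here
  remove_labels_goA tmp (List.range tmp.length)

-- ===== PORT B =====
def remove_labels_alt (article : String) : Option String :=
  let sentences := (PySem.Str.split? article ".").getD []   -- sep "." ≠ "": split? is always `some` here
  let last : Option Int := (PySem.List.enumerate sentences 0).foldl
    (fun acc p =>
      if ["true", "false", "pants"].any (fun kw => PySem.Str.isIn kw (PySem.Str.lower p.2)) then
        some p.1
      else acc) none
  match last with
  | none => none
  | some j =>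
      some (String.ofList
        ((PySem.Str.join "." (PySem.List.slice sentences none (some j))).toList ++ ['.']))

-- ===== PRECONDITION & SPEC =====
def Spec_remove_labels (article : String) (out : Option String) : Prop := out = remove_labels_alt article
instance (article : String) (out : Option String) : Decidable (Spec_remove_labels article out) := by unfold Spec_remove_labels; infer_instance

-- ===== CLAIM (what is proved, stated in full; the proofs are below) =====
def Claim_equal_remove_labels : Prop := ∀ (article : String), Dom_remove_labels article → Spec_remove_labels article (remove_labels article)

-- ===== LEMMAS AND PROOFS =====

/-- the (shared) per-sentence keyword test, named for the proofs -/
def pvHit (s : String) : Bool :=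
  ["true", "false", "pants"].any (fun kw => PySem.Str.isIn kw (PySem.Str.lower s))

theorem pvHit_def (s : String) :
    (["true", "false", "pants"].any (fun kw => PySem.Str.isIn kw (PySem.Str.lower s))) = pvHit s := rfl

/-- index of the LAST sentence containing a keyword, defined on the reversed list -/
def pvLastRev : List String → Option Nat
  | [] => none
  | x :: r => if pvHit x then some r.length else pvLastRev r

def pvLast (xs : List String) : Option Nat := pvLastRev xs.reverse

theorem pvLast_append (xs : List String) (x : String) :
    pvLast (xs ++ [x]) = if pvHit x then some xs.length else pvLast xs := by
  simp [pvLast, pvLastRev]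

theorem pvLastRev_lt (l : List String) (j : Nat) (h : pvLastRev l = some j) : j < l.length := by
  induction l with
  | nil => simp [pvLastRev] at h
  | cons x r ih =>
      by_cases hx : pvHit x
      · simp only [pvLastRev, hx, if_pos, Option.some.injEq] at h
        simp [← h]
      · simp only [pvLastRev, hx, Bool.false_eq_true, if_false] at h
        have := ih h; simp; omega

theorem pvLast_lt (xs : List String) (j : Nat) (h : pvLast xs = some j) : j < xs.length := by
  have := pvLastRev_lt xs.reverse j h
  simpa using this

theorem enumerate_append (xs : List String) (x : String) (s : Int) :
    PySem.List.enumerate (xs ++ [x]) s = PySem.List.enumerate xs s ++ [(s + xs.length, x)] := by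
  induction xs generalizing s with
  | nil => simp [PySem.List.enumerate_nil, PySem.List.enumerate_cons]
  | cons y ys ih =>
      simp [PySem.List.enumerate_cons, ih]
      ring_nf

theorem slice_neg (xs : List String) (k : Nat) (h : 0 < k) :
    PySem.List.slice xs none (some (-(k : Int))) = xs.take (xs.length - k) := by
  simp only [PySem.List.slice, tsub_zero, List.drop_zero]
  rw [PySem.List.clampIdx_neg_natCast _ _ h]

theorem pyGetD_neg (xs : List String) (i : Nat) (d : String) (h : i < xs.length) :
    PySem.List.pyGetD xs (-(i : Int) - 1) d = xs.getD (xs.length - 1 - i) d := by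
  have h1 : ¬ (1 : Int) ≤ -(i : Int) := by omega
  have h2 : ((1 : Int) + i).toNat = 1 + i := by omega
  simp only [PySem.List.pyGetD, PySem.List.pyGet?, PySem.List.pyIdx?, neg_sub, sub_neg_eq_add,
    h2]
  have h3 : xs.length - (1 + i) = xs.length - 1 - i := by omega
  simp [h1, h, h3]

/-- B's fold computes `pvLast` (cast to Int). -/
theorem foldB_eq (xs : List String) :
    (PySem.List.enumerate xs 0).foldl
      (fun acc p =>
        if ["true", "false", "pants"].any (fun kw => PySem.Str.isIn kw (PySem.Str.lower p.2)) then
          some p.1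
        else acc) none
    = (pvLast xs).map (fun j => (j : Int)) := by
  show (PySem.List.enumerate xs 0).foldl
      (fun acc p => if pvHit p.2 then some p.1 else acc) none
    = (pvLast xs).map (fun j => (j : Int))
  induction xs using List.reverseRecOn with
  | nil => simp [PySem.List.enumerate_nil, pvLast, pvLastRev]
  | append_singleton ys y ih =>
      rw [enumerate_append, List.foldl_append, ih, pvLast_append]
      by_cases h : pvHit y <;> simp [h]

def pvOut (xs : List String) (j : Nat) : Option String :=
  some (String.ofList ((PySem.Str.join "." (xs.take j)).toList ++ ['.']))

/-- shifting A's index list by one over an appended element changes nothing. -/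
theorem goA_shift (xs : List String) (x : String) (is : List Nat)
    (hb : ∀ i ∈ is, i < xs.length) :
    remove_labels_goA (xs ++ [x]) (is.map (· + 1)) = remove_labels_goA xs is := by
  induction is with
  | nil => rfl
  | cons i rest ih =>
      have hi : i < xs.length := hb i (by simp)
      have hget : PySem.List.pyGetD (xs ++ [x]) (-((i + 1 : Nat) : Int) - 1) ""
          = PySem.List.pyGetD xs (-(i : Int) - 1) "" := by
        rw [pyGetD_neg _ _ _ (by simp only [List.length_append, List.length_singleton]; omega),
          pyGetD_neg _ _ _ hi]
        have e : (xs ++ [x]).length - 1 - (i + 1) = xs.length - 1 - i := by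
          simp only [List.length_append, List.length_singleton]; omega
        rw [e, List.getD_eq_getElem?_getD, List.getD_eq_getElem?_getD,
          List.getElem?_append_left (by omega)]
      have hslice : PySem.List.slice (xs ++ [x]) none (some (-((i + 1 : Nat) : Int) - 1))
          = PySem.List.slice xs none (some (-(i : Int) - 1)) := by
        have e1 : (-((i + 1 : Nat) : Int) - 1) = -(((i + 2 : Nat)) : Int) := by push_cast; ring
        have e2 : (-(i : Int) - 1) = -(((i + 1 : Nat)) : Int) := by push_cast; ring
        rw [e1, e2, slice_neg _ _ (by omega), slice_neg _ _ (by omega)]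
        rw [List.take_append_of_le_length (by simp only [List.length_append, List.length_singleton]; omega)]
        congr 1
        simp only [List.length_append, List.length_singleton]; omega
      simp only [List.map_cons, remove_labels_goA, hget, hslice]
      split
      · rfl
      · exact ih (fun j hj => hb j (by simp [hj]))

/-- A's reverse scan finds the last matching index (and emits the joined prefix). -/
theorem goA_eq (xs : List String) :
    remove_labels_goA xs (List.range xs.length)
      = (pvLast xs).bind (fun j => pvOut xs j) := by
  induction xs using List.reverseRecOn with
  | nil => simp [remove_labels_goA, pvLast, pvLastRev]
  | append_singleton ys y ih =>
      have hlen : (ys ++ [y]).length = ys.length + 1 := by simp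
      rw [hlen, List.range_succ_eq_map]
      have hget : PySem.List.pyGetD (ys ++ [y]) (-((0 : Nat) : Int) - 1) "" = y := by
        rw [pyGetD_neg _ _ _ (by simp)]
        simp
      simp only [remove_labels_goA, hget, pvHit_def]
      rw [pvLast_append]
      by_cases h : pvHit y
      · simp only [h, if_pos]
        have hsl : PySem.List.slice (ys ++ [y]) none (some (-((0 : Nat) : Int) - 1))
            = ys := by
          rw [show (-((0 : Nat) : Int) - 1) = -((1 : Nat) : Int) by omega,
            slice_neg _ _ (by omega)]
          rw [List.take_append_of_le_length (by simp)]
          simp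
        rw [hsl]
        simp only [Option.bind_some, pvOut]
        rw [List.take_left]
      · simp only [h, Bool.false_eq_true, if_false]
        rw [goA_shift ys y _ (fun i hi => by simpa using List.mem_range.mp hi), ih]
        rcases hj : pvLast ys with _ | j
        · simp
        · have hjlt : j < ys.length := pvLast_lt ys j hj
          simp only [Option.bind_some, pvOut]
          rw [List.take_append_of_le_length (by omega)]

-- ===== VERDICT (by name: the statement is the Claim_ definition above) =====
theorem remove_labels_spec : Claim_equal_remove_labels := by
  intro article _
  unfold Spec_remove_labels remove_labels remove_labels_alt
  simp only [goA_eq]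
  rw [foldB_eq]
  rcases hj : pvLast ((PySem.Str.split? article ".").getD []) with _ | j
  · rfl
  · have hjlt := pvLast_lt _ _ hj
    simp [pvOut, PySem.List.slice_to _ (Int.natCast_nonneg j)]
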